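-- pv_equiv track=rewrite | github.com/yashkumar1992/DataStructuresAlgorithms | data_structures/array_problems.py | move_pos_neg_brute_force
-- ===== SOURCE A (Python) =====
-- def move_pos_neg_brute_force(arr):
--     res= []
--     for element in arr:
--         if element<0:
--             res.append(element)
--
--     for element in arr:
--         if element >=0:
--             res.append(element)
--
--     return res
-- ===== SOURCE B (Python) =====
-- def move_pos_neg_brute_force(arr):
--     neg = []
--     nonneg = []
--     for element in arr:
--         if element < 0:
--             neg.append(element)
--         elif element >= 0:
--             nonneg.append(element)
--     return neg + nonneg
-- ===== Notes on version B (the rewrite author's own statement) =====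
-- stated objective: simpler
-- what changed: Replaces A's two sequential passes over arr (one collecting negatives, one collecting non-negatives) with a single pass routing each element into one of two accumulators, concatenated at the end.
import Mathlib
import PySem

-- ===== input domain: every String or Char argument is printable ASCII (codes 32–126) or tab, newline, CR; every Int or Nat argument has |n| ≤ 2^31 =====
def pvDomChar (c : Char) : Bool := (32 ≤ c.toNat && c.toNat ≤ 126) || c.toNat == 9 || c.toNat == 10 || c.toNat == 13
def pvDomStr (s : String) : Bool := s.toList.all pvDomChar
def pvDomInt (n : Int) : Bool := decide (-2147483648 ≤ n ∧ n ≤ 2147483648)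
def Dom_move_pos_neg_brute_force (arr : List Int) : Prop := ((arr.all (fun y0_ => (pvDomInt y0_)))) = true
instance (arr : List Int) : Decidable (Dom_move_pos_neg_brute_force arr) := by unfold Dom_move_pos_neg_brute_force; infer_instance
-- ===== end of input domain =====

-- B changes the decomposition only: one pass with two accumulators instead of A's two passes; same values, no speed claim.

-- ===== PORT A =====
-- A: first loop appends negatives to res, second loop appends non-negatives to res.
def move_pos_neg_brute_force (arr : List Int) : List Int :=
  let res := arr.foldl (fun res element => if element < 0 then res ++ [element] else res) []
  let res := arr.foldl (fun res element => if element ≥ 0 then res ++ [element] else res) res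
  res

-- ===== PORT B =====
-- B: single loop routing each element into `neg` or `nonneg`, then neg ++ nonneg.
def move_pos_neg_brute_force_alt (arr : List Int) : List Int :=
  let p := arr.foldl
    (fun (p : List Int × List Int) element =>
      if element < 0 then (p.1 ++ [element], p.2)
      else if element ≥ 0 then (p.1, p.2 ++ [element])
      else p)
    ([], [])
  p.1 ++ p.2

-- ===== PRECONDITION & SPEC =====
def Spec_move_pos_neg_brute_force (arr : List Int) (out : List Int) : Prop := out = move_pos_neg_brute_force_alt arr
instance (arr : List Int) (out : List Int) : Decidable (Spec_move_pos_neg_brute_force arr out) := by unfold Spec_move_pos_neg_brute_force; infer_instance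

-- ===== CLAIM (what is proved, stated in full; the proofs are below) =====
def Claim_equal_move_pos_neg_brute_force : Prop := ∀ (arr : List Int), Dom_move_pos_neg_brute_force arr → Spec_move_pos_neg_brute_force arr (move_pos_neg_brute_force arr)

-- ===== LEMMAS AND PROOFS =====

theorem pv_foldl_neg (arr : List Int) (acc : List Int) :
    arr.foldl (fun res element => if element < 0 then res ++ [element] else res) acc
      = acc ++ arr.filter (fun e => decide (e < 0)) := by
  induction arr generalizing acc with
  | nil => simp
  | cons x xs ih =>
    simp only [List.foldl_cons, List.filter_cons]
    by_cases h : x < 0 <;> simp [h, ih, List.append_assoc]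

theorem pv_foldl_nonneg (arr : List Int) (acc : List Int) :
    arr.foldl (fun res element => if element ≥ 0 then res ++ [element] else res) acc
      = acc ++ arr.filter (fun e => decide (e ≥ 0)) := by
  induction arr generalizing acc with
  | nil => simp
  | cons x xs ih =>
    simp only [List.foldl_cons, List.filter_cons]
    by_cases h : x ≥ 0 <;> simp [h, ih, List.append_assoc]

theorem pv_foldl_pair (arr : List Int) (acc : List Int × List Int) :
    arr.foldl
      (fun (p : List Int × List Int) element =>
        if element < 0 then (p.1 ++ [element], p.2)
        else if element ≥ 0 then (p.1, p.2 ++ [element])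
        else p)
      acc
      = (acc.1 ++ arr.filter (fun e => decide (e < 0)),
         acc.2 ++ arr.filter (fun e => decide (e ≥ 0))) := by
  induction arr generalizing acc with
  | nil => simp
  | cons x xs ih =>
    simp only [List.foldl_cons, List.filter_cons]
    by_cases h : x < 0
    · have h2 : ¬ x ≥ 0 := by omega
      simp [h, h2, ih, List.append_assoc]
    · have h2 : x ≥ 0 := by omega
      simp [h, h2, ih, List.append_assoc]

-- ===== VERDICT (by name: the statement is the Claim_ definition above) =====
theorem move_pos_neg_brute_force_spec : Claim_equal_move_pos_neg_brute_force := by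
  intro arr _
  unfold Spec_move_pos_neg_brute_force move_pos_neg_brute_force move_pos_neg_brute_force_alt
  simp [pv_foldl_neg, pv_foldl_nonneg, pv_foldl_pair]
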